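-- pv_equiv track=rewrite | github.com/jinglin4300/coding_challenges | palladium_2020.py | solution
-- ===== SOURCE A (Python) =====
-- def solution(H):
--     # write your code in Python 3.6
--     if len(H) == 0:
--         return 0
--     if len(H) <= 2:
--         return sum(H)
--
--     left_max = []
--     curr_max = 0
--     for i in range(len(H)):
--         curr_max = max(curr_max, H[i])
--         left_max.append(curr_max)
--     right_max = []
--     curr_max = 0
--     for i in range(len(H) - 1, -1, -1):
--         curr_max = max(curr_max, H[i])
--         right_max.append(curr_max)
--     right_max.reverse()
--
--     smallest = float("inf")
--     for i in range(1, len(H)):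
--         # partition on i: left includes num up to i, right includes rest of nums
--         area = i * left_max[i - 1] + (len(H) - i) * right_max[i]
--         if area < smallest:
--             smallest = area
--     return smallest
-- ===== SOURCE B (Python) =====
-- def solution(H):
--     n = len(H)
--     if n == 0:
--         return 0
--     if n <= 2:
--         return sum(H)
--     M = max(H)
--     if M <= 0:
--         # every 0-seeded running maximum is 0, so every split has area 0
--         return 0
--     p = H.index(M)
--     # every split's area is at most n*M, so this is a safe starting minimum
--     best = n * M
--     # splits i <= p: the right part contains the global max, its factor is M
--     left = 0
--     for i in range(1, p + 1):
--         left = max(left, H[i - 1])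
--         best = min(best, i * left + (n - i) * M)
--     # splits i > p: the left part contains the global max, its factor is M
--     right = 0
--     for i in range(n - 1, p, -1):
--         right = max(right, H[i])
--         best = min(best, i * M + (n - i) * right)
--     return best
-- ===== Notes on version B (the rewrite author's own statement) =====
-- stated objective: alternative
-- what changed: B locates the global maximum M=max(H) first (returning 0 immediately when M<=0, since all 0-seeded running maxima are then 0) and scans outward from its position p: for splits i<=p the right factor is constantly M so only a running left maximum is needed, and for splits i>p the left factor is constantly M so only a running right maximum is needed; no auxiliary arrays, no float('inf'), seeded with the provable bound n*M instead.
import Mathlib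
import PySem

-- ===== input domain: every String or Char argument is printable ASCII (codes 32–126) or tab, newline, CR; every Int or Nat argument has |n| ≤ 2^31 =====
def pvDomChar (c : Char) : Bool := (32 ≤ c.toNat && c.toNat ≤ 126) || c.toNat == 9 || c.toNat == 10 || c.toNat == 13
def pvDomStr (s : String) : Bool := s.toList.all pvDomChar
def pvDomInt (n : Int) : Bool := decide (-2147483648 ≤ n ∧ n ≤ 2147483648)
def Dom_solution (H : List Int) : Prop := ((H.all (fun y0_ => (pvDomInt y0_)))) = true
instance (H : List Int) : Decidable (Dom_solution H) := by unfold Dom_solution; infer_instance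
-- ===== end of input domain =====

-- B is a different algorithm: it finds the global maximum M = max(H) and its position p,
-- returns 0 at once when M ≤ 0, and otherwise scans outward from p — for splits i ≤ p the
-- right-hand factor is constantly M, for splits i > p the left-hand factor is constantly M —
-- so no auxiliary max arrays and no sentinel are needed; objective: alternative.


-- ===== PORT A =====
-- "curr_max = 0; for i in range(len(H)): curr_max = max(curr_max, H[i]); left_max.append(curr_max)"
def lmaxA (c : Int) : List Int → List Int
  | [] => []
  | h :: t => (max c h) :: lmaxA (max c h) t

-- backward loop "for i in range(len(H)-1,-1,-1): curr_max = max(curr_max, H[i]); right_max.append(curr_max)"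
-- followed by right_max.reverse(): the same values computed from the right end, in the reversed order
def rmaxA : List Int → List Int
  | [] => []
  | h :: t =>
    let r := rmaxA t
    (max (match r with | [] => 0 | m :: _ => m) h) :: r

def solution (H : List Int) : Int :=
  if H.length = 0 then 0
  else if H.length ≤ 2 then H.sum
  else
    let leftMax := lmaxA 0 H
    let rightMax := rmaxA H
    let n : Int := H.length
    -- smallest = float("inf") modelled as none (area < inf always holds)
    let smallest := (List.range' 1 (H.length - 1)).foldl
      (fun (s : Option Int) (i : Nat) =>
        let area : Int := (i : Int) * leftMax.getD (i - 1) 0 + (n - (i : Int)) * rightMax.getD i 0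
        match s with
        | none => some area
        | some m => if area < m then some area else some m)
      none
    smallest.getD 0   -- the loop is nonempty (len ≥ 3), so smallest is always some

-- ===== PORT B =====
def solution_alt (H : List Int) : Int :=
  if H.length = 0 then 0
  else if H.length ≤ 2 then H.sum
  else
    let n : Int := H.length
    match PySem.List.max? H (fun x => x) with    -- M = max(H); some, since H is nonempty
    | none => 0
    | some M =>
      if M ≤ 0 then 0
      else
        match PySem.List.index? H M with         -- p = H.index(M); some, since M ∈ H
        | none => 0
        | some p =>
          -- "best = n*M; left = 0; for i in range(1, p+1): left = max(left, H[i-1]); best = min(best, i*left + (n-i)*M)"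
          let s1 := (List.range' 1 p).foldl
            (fun (q : Int × Int) (i : Nat) =>
              let left := max q.1 (H.getD (i - 1) 0)
              (left, min q.2 ((i : Int) * left + (n - (i : Int)) * M)))
            (0, n * M)
          -- "right = 0; for i in range(n-1, p, -1): right = max(right, H[i]); best = min(best, i*M + (n-i)*right)"
          let s2 := ((List.range' (p + 1) (H.length - 1 - p)).reverse).foldl
            (fun (q : Int × Int) (i : Nat) =>
              let right := max q.1 (H.getD i 0)
              (right, min q.2 ((i : Int) * M + (n - (i : Int)) * right)))
            (0, s1.2)
          s2.2

-- ===== PRECONDITION & SPEC =====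
def Spec_solution (H : List Int) (out : Int) : Prop := out = solution_alt H
instance (H : List Int) (out : Int) : Decidable (Spec_solution H out) := by unfold Spec_solution; infer_instance

-- ===== CLAIM =====
def Claim_equal_solution : Prop := ∀ (H : List Int), Dom_solution H → Spec_solution H (solution H)

-- ===== LEMMAS AND PROOFS =====

-- prefix maximum seeded at 0 (A's left_max[i-1]; B's running `left` for splits left of p)
def pvPm (H : List Int) (i : Nat) : Int := (H.take i).foldl max 0

-- suffix maximum seeded at 0
def pvSm (H : List Int) (i : Nat) : Int := (H.drop i).foldl max 0

def pvArea (H : List Int) (i : Nat) : Int :=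
  (i : Int) * pvPm H i + ((H.length : Int) - (i : Int)) * pvSm H i

def pvStep (s : Option Int) (a : Int) : Option Int :=
  match s with
  | none => some a
  | some m => if a < m then some a else some m

theorem pvFoldlMaxShift (l : List Int) (a b : Int) :
    l.foldl max (max a b) = max a (l.foldl max b) := by
  induction l generalizing b with
  | nil => rfl
  | cons h t ih =>
    simp only [List.foldl_cons]
    rw [max_assoc, ih]

theorem pvRmaxGetD (H : List Int) (j : Nat) : (rmaxA H).getD j 0 = pvSm H j := by
  induction H generalizing j with
  | nil => simp [rmaxA, pvSm]
  | cons h t ih =>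
    cases j with
    | zero =>
      have hm : (match rmaxA t with | [] => (0:Int) | m :: _ => m) = (rmaxA t).getD 0 0 := by
        cases rmaxA t <;> rfl
      simp only [rmaxA, List.getD_cons_zero, hm, ih, pvSm, List.drop_zero, List.foldl_cons]
      rw [max_comm (0:Int) h, pvFoldlMaxShift, max_comm]
    | succ j =>
      simp only [rmaxA, List.getD_cons_succ, ih, pvSm, List.drop_succ_cons]

theorem pvLmaxGetD (H : List Int) (c : Int) (j : Nat) (hj : j < H.length) :
    (lmaxA c H).getD j 0 = (H.take (j + 1)).foldl max c := by
  induction H generalizing c j with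
  | nil => simp at hj
  | cons h t ih =>
    cases j with
    | zero => simp [lmaxA]
    | succ j =>
      have hj' : j < t.length := by simpa using hj
      simp only [lmaxA, List.getD_cons_succ, ih _ _ hj', List.take_succ_cons, List.foldl_cons]

theorem pvPmSucc (H : List Int) (i : Nat) (hi : i < H.length) :
    pvPm H (i + 1) = max (pvPm H i) (H.getD i 0) := by
  unfold pvPm
  rw [List.take_add_one, List.getElem?_eq_getElem hi, Option.toList_some, List.foldl_append,
      List.foldl_cons, List.foldl_nil]
  simp [List.getD, List.getElem?_eq_getElem hi]

theorem pvSmSucc (H : List Int) (i : Nat) (hi : i < H.length) :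
    pvSm H i = max (H.getD i 0) (pvSm H (i + 1)) := by
  unfold pvSm
  rw [List.drop_eq_getElem_cons hi, List.foldl_cons]
  rw [show max (0:Int) H[i] = max H[i] 0 from max_comm _ _, pvFoldlMaxShift]
  simp [List.getD, List.getElem?_eq_getElem hi]

-- A's min loop, rewritten pointwise to pvArea using the two array characterisations
theorem pvLoopA (H : List Int) (m : Nat) (hm : m + 1 ≤ H.length) :
    (List.range' 1 m).foldl
      (fun (s : Option Int) (i : Nat) =>
        let area : Int := (i : Int) * (lmaxA 0 H).getD (i - 1) 0 + ((H.length : Int) - (i : Int)) * (rmaxA H).getD i 0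
        match s with
        | none => some area
        | some mm => if area < mm then some area else some mm)
      none
    = (List.range' 1 m).foldl (fun s i => pvStep s (pvArea H i)) none := by
  induction m with
  | zero => rfl
  | succ m ih =>
    have hm' : m + 1 ≤ H.length := Nat.le_of_succ_le hm
    rw [List.range'_1_concat, List.foldl_append, List.foldl_append, ih hm']
    simp only [List.foldl_cons, List.foldl_nil]
    have h1 : 1 + m - 1 < H.length := by omega
    rw [pvLmaxGetD H 0 _ h1, pvRmaxGetD]
    have e1 : 1 + m - 1 + 1 = 1 + m := by omega
    have e2 : 1 + m = m + 1 := by omega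
    rw [e1, e2]
    rfl

-- max-fold order bounds
theorem pvLeFoldlMax (l : List Int) (c : Int) : c ≤ l.foldl max c := by
  induction l generalizing c with
  | nil => exact le_refl _
  | cons h t ih => exact le_trans (le_max_left c h) (ih _)

theorem pvMemLeFoldlMax (l : List Int) (c x : Int) (hx : x ∈ l) : x ≤ l.foldl max c := by
  induction l generalizing c with
  | nil => cases hx
  | cons h t ih =>
    rcases List.mem_cons.mp hx with rfl | hx'
    · exact le_trans (le_max_right c x) (pvLeFoldlMax t _)
    · exact ih _ hx'

theorem pvFoldlMaxLe (l : List Int) (c M : Int) (hc : c ≤ M) (h : ∀ x ∈ l, x ≤ M) :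
    l.foldl max c ≤ M := by
  induction l generalizing c with
  | nil => exact hc
  | cons a t ih =>
    exact ih _ (max_le hc (h a List.mem_cons_self)) (fun x hx => h x (List.mem_cons_of_mem _ hx))

-- min-fold lemmas
theorem pvStepFold (t : List Int) (m : Int) :
    t.foldl pvStep (some m) = some (t.foldl min m) := by
  induction t generalizing m with
  | nil => rfl
  | cons a t ih =>
    have h : pvStep (some m) a = some (min m a) := by
      unfold pvStep
      rcases lt_or_ge a m with h | h
      · simp [min_def, h, not_le_of_gt h]
      · have : ¬ a < m := not_lt_of_ge h
        simp [this, h]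
    simp only [List.foldl_cons, h, ih]

theorem pvOptFold (l : List Int) (c : Int) (hne : l ≠ []) (hc : ∀ x ∈ l, x ≤ c) :
    l.foldl pvStep none = some (l.foldl min c) := by
  cases l with
  | nil => exact absurd rfl hne
  | cons a t =>
    have h1 : pvStep none a = some a := rfl
    simp only [List.foldl_cons, h1, pvStepFold]
    have : min c a = a := min_eq_right (hc a List.mem_cons_self)
    rw [this]

theorem pvFoldlMinPull (t : List Int) (c a : Int) :
    t.foldl min (min c a) = min (t.foldl min c) a := by
  induction t generalizing c with
  | nil => rfl
  | cons h t ih =>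
    simp only [List.foldl_cons]
    rw [show min (min c a) h = min (min c h) a by
      rw [min_assoc, min_comm a h, ← min_assoc], ih]

theorem pvFoldlMinReverse (l : List Int) (c : Int) :
    l.reverse.foldl min c = l.foldl min c := by
  induction l generalizing c with
  | nil => rfl
  | cons a t ih =>
    simp only [List.reverse_cons, List.foldl_append, List.foldl_cons, List.foldl_nil, ih]
    rw [← pvFoldlMinPull]

theorem pvFoldlMinConst (l : List Int) (c : Int) (h : ∀ x ∈ l, c ≤ x) :
    l.foldl min c = c := by
  induction l with
  | nil => rfl
  | cons a t ih =>
    simp only [List.foldl_cons, min_eq_left (h a List.mem_cons_self)]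
    exact ih (fun x hx => h x (List.mem_cons_of_mem _ hx))

-- B's first loop: running prefix maximum, right factor constantly M
theorem pvLoopB1 (H : List Int) (M b0 : Int) (m : Nat) (hm : m < H.length)
    (harea : ∀ i : Nat, 1 ≤ i → i ≤ m →
      (i : Int) * pvPm H i + ((H.length : Int) - (i : Int)) * M = pvArea H i) :
    (List.range' 1 m).foldl
      (fun (q : Int × Int) (i : Nat) =>
        let left := max q.1 (H.getD (i - 1) 0)
        (left, min q.2 ((i : Int) * left + ((H.length : Int) - (i : Int)) * M)))
      (0, b0)
    = (pvPm H m, ((List.range' 1 m).map (pvArea H)).foldl min b0) := by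
  induction m with
  | zero => simp [pvPm]
  | succ m ih =>
    have hm' : m < H.length := Nat.lt_of_succ_lt hm
    have harea' : ∀ i : Nat, 1 ≤ i → i ≤ m →
        (i : Int) * pvPm H i + ((H.length : Int) - (i : Int)) * M = pvArea H i :=
      fun i h1 h2 => harea i h1 (Nat.le_succ_of_le h2)
    rw [List.range'_1_concat, List.foldl_append, List.map_append, List.foldl_append, ih hm' harea']
    simp only [List.foldl_cons, List.foldl_nil, List.map_cons, List.map_nil]
    have h1m : 1 + m - 1 = m := by omega
    have h2 : 1 + m = m + 1 := by omega
    rw [h1m, h2, ← pvPmSucc H m hm']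
    rw [harea (m + 1) (by omega) (le_refl _)]

-- B's second loop: descending, running suffix maximum, left factor constantly M
theorem pvLoopB2 (H : List Int) (M b0 : Int) (j k : Nat) (hk : j + k ≤ H.length)
    (harea : ∀ i : Nat, j ≤ i → i < j + k →
      (i : Int) * M + ((H.length : Int) - (i : Int)) * pvSm H i = pvArea H i) :
    ((List.range' j k).reverse).foldl
      (fun (q : Int × Int) (i : Nat) =>
        let right := max q.1 (H.getD i 0)
        (right, min q.2 ((i : Int) * M + ((H.length : Int) - (i : Int)) * right)))
      (pvSm H (j + k), b0)
    = (pvSm H j, (((List.range' j k).reverse).map (pvArea H)).foldl min b0) := by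
  induction k generalizing b0 with
  | zero => simp
  | succ k ih =>
    have hjk : j + k < H.length := by omega
    rw [List.range'_1_concat, List.reverse_append]
    simp only [List.reverse_cons, List.reverse_nil, List.nil_append, List.cons_append,
      List.foldl_cons, List.map_cons, List.nil_append]
    have hstep : max (pvSm H (j + (k + 1))) (H.getD (j + k) 0) = pvSm H (j + k) := by
      rw [show j + (k + 1) = (j + k) + 1 by omega, ← max_comm, ← pvSmSucc H (j + k) hjk]
    rw [hstep, harea (j + k) (by omega) (by omega)]
    have harea' : ∀ i : Nat, j ≤ i → i < j + k →
        (i : Int) * M + ((H.length : Int) - (i : Int)) * pvSm H i = pvArea H i :=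
      fun i h1 h2 => harea i h1 (by omega)
    exact ih _ (by omega) harea'

-- pm/sm characterisation around the position p of the maximum
theorem pvPmLe (H : List Int) (M : Int) (i : Nat) (h0 : 0 ≤ M) (h : ∀ x ∈ H, x ≤ M) :
    pvPm H i ≤ M :=
  pvFoldlMaxLe _ _ _ h0 (fun x hx => h x (List.take_subset i H hx))

theorem pvSmLe (H : List Int) (M : Int) (i : Nat) (h0 : 0 ≤ M) (h : ∀ x ∈ H, x ≤ M) :
    pvSm H i ≤ M :=
  pvFoldlMaxLe _ _ _ h0 (fun x hx => h x (List.drop_subset i H hx))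

theorem pvPmEq (H : List Int) (M : Int) (p i : Nat) (hp : p < H.length) (hpi : p < i)
    (hM : H[p] = M) (h0 : 0 ≤ M) (h : ∀ x ∈ H, x ≤ M) : pvPm H i = M := by
  refine le_antisymm (pvPmLe H M i h0 h) ?_
  have hmem : M ∈ H.take i := by
    have hlt : p < (H.take i).length := by simp [List.length_take]; omega
    have : (H.take i)[p] = H[p] := List.getElem_take
    rw [← hM, ← this]
    exact List.getElem_mem hlt
  exact pvMemLeFoldlMax _ _ _ hmem

theorem pvSmEq (H : List Int) (M : Int) (p i : Nat) (hp : p < H.length) (hpi : i ≤ p)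
    (hM : H[p] = M) (h0 : 0 ≤ M) (h : ∀ x ∈ H, x ≤ M) : pvSm H i = M := by
  refine le_antisymm (pvSmLe H M i h0 h) ?_
  have hmem : M ∈ H.drop i := by
    have hlt : p - i < (H.drop i).length := by simp [List.length_drop]; omega
    have : (H.drop i)[p - i] = H[i + (p - i)]'(by omega) := List.getElem_drop ..
    have he : H[i + (p - i)]'(by omega) = M := by
      have : i + (p - i) = p := by omega
      simp only [this]; exact hM
    rw [← he, ← this]
    exact List.getElem_mem hlt
  exact pvMemLeFoldlMax _ _ _ hmem

theorem pvAreaBound (H : List Int) (M : Int) (i : Nat) (h0 : 0 ≤ M) (h : ∀ x ∈ H, x ≤ M)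
    (hi : i ≤ H.length) : pvArea H i ≤ (H.length : Int) * M := by
  have h1 : pvPm H i ≤ M := pvPmLe H M i h0 h
  have h2 : pvSm H i ≤ M := pvSmLe H M i h0 h
  have h3 : (0:Int) ≤ pvPm H i := pvLeFoldlMax _ _
  have h4 : (0:Int) ≤ pvSm H i := pvLeFoldlMax _ _
  have h5 : (0:Int) ≤ (i:Int) := Int.natCast_nonneg i
  have h6 : (i:Int) ≤ (H.length:Int) := by exact_mod_cast hi
  unfold pvArea
  nlinarith

-- ===== VERDICT (by name: the statement is the Claim_ definition above) =====
theorem solution_spec : Claim_equal_solution := by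
  intro H _
  unfold Spec_solution solution solution_alt
  by_cases h0 : H.length = 0
  · simp [h0]
  · by_cases h2 : H.length ≤ 2
    · simp [h0, h2]
    · simp only [h0, h2, if_false]
      have hlen : 3 ≤ H.length := by omega
      have hne : H ≠ [] := by intro hcon; rw [hcon] at h0; exact h0 rfl
      -- max(H) is some
      obtain ⟨M, hM⟩ : ∃ M, PySem.List.max? H (fun x => x) = some M := by
        cases H with
        | nil => simp at h0
        | cons a t => exact ⟨t.foldl max a, PySem.List.max?_id_cons ..⟩
      have hMmem : M ∈ H := PySem.List.max?_mem hM
      have hMmax : ∀ y ∈ H, y ≤ M := by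
        intro y hy; exact PySem.List.max?_isMax hM y hy
      rw [hM]
      -- A's fold rewritten through the pvArea characterisation
      have hA := pvLoopA H (H.length - 1) (by omega)
      simp only [hA]
      set l := List.range' 1 (H.length - 1) with hl
      have hlne : l ≠ [] := by
        rw [hl]; intro hcon
        have := List.range'_eq_nil_iff.mp hcon
        omega
      have hmapne : l.map (pvArea H) ≠ [] := by
        intro hcon; exact hlne (List.map_eq_nil_iff.mp hcon)
      have hAfold : l.foldl (fun s i => pvStep s (pvArea H i)) none
          = (l.map (pvArea H)).foldl pvStep none := by rw [List.foldl_map]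
      by_cases hMle : M ≤ 0
      · -- all elements ≤ 0: every area is 0 and A returns 0
        simp only [hMle, if_true]
        have hzero : ∀ i ∈ l, pvArea H i = 0 := by
          intro i _
          have hpm : pvPm H i = 0 :=
            le_antisymm (pvFoldlMaxLe _ _ _ (le_refl _)
              (fun x hx => le_trans (hMmax x (List.take_subset i H hx)) hMle))
              (pvLeFoldlMax _ _)
          have hsm : pvSm H i = 0 :=
            le_antisymm (pvFoldlMaxLe _ _ _ (le_refl _)
              (fun x hx => le_trans (hMmax x (List.drop_subset i H hx)) hMle))
              (pvLeFoldlMax _ _)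
          unfold pvArea; rw [hpm, hsm]; ring
        have hbd : ∀ x ∈ l.map (pvArea H), x ≤ 0 := by
          intro x hx
          obtain ⟨i, hi, rfl⟩ := List.mem_map.mp hx
          rw [hzero i hi]
        rw [hAfold, pvOptFold _ 0 hmapne hbd]
        have : (l.map (pvArea H)).foldl min 0 = 0 := by
          refine pvFoldlMinConst _ _ ?_
          intro x hx
          obtain ⟨i, hi, rfl⟩ := List.mem_map.mp hx
          rw [hzero i hi]
        rw [this]; rfl
      · -- main case: M > 0
        rw [not_le] at hMle
        simp only [not_le.mpr hMle, if_false]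
        have h0M : (0:Int) ≤ M := le_of_lt hMle
        obtain ⟨p, hp⟩ : ∃ p, PySem.List.index? H M = some p :=
          Option.isSome_iff_exists.mp ((PySem.List.index?_isSome_iff H M).mpr hMmem)
        rw [hp]
        obtain ⟨hplt, hpv, -⟩ := PySem.List.getElem_of_index?_eq_some hp
        -- bound: every area in the scanned range is at most n*M
        have hbd : ∀ x ∈ l.map (pvArea H), x ≤ (H.length : Int) * M := by
          intro x hx
          obtain ⟨i, hi, rfl⟩ := List.mem_map.mp hx
          have hi' := List.mem_range'_1.mp (by rw [← hl] at *; exact hi)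
          exact pvAreaBound H M i h0M hMmax (by omega)
        rw [hAfold, pvOptFold _ ((H.length : Int) * M) hmapne hbd]
        -- split the range at p
        have hsplit : l = List.range' 1 p ++ List.range' (p + 1) (H.length - 1 - p) := by
          rw [hl, show H.length - 1 = p + (H.length - 1 - p) by omega, ← List.range'_append,
            show 1 + 1 * p = p + 1 by omega]
          simp
        -- B's first loop
        have hB1 := pvLoopB1 H M ((H.length : Int) * M) p (by omega)
          (fun i h1 h2 => by
            unfold pvArea
            rw [pvSmEq H M p i hplt (by omega) hpv h0M hMmax])
        -- B's second loop
        have hsm0 : pvSm H ((p + 1) + (H.length - 1 - p)) = 0 := by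
          have : (p + 1) + (H.length - 1 - p) = H.length := by omega
          rw [this]; unfold pvSm; simp
        have hB2 := pvLoopB2 H M
          (((List.range' 1 p).map (pvArea H)).foldl min ((H.length : Int) * M))
          (p + 1) (H.length - 1 - p) (by omega)
          (fun i h1 h2 => by
            unfold pvArea
            rw [pvPmEq H M p i hplt (by omega) hpv h0M hMmax])
        rw [hsm0] at hB2
        simp only [hB1, hB2]
        -- combine: fold over both halves equals fold over the whole range
        rw [hsplit, List.map_append, List.foldl_append, Option.getD_some,
          List.map_reverse, pvFoldlMinReverse]
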